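-- pv_equiv track=rewrite | github.com/dvrx47/sztuczna_inteligencja | P1/z1/funkcje.py | tower_correct
-- ===== SOURCE A (Python) =====
-- def tower_correct( turn ):
--     min_l = ord('a')
--     max_l = ord('h')
--
--     current_letter = ord( turn[3][0])
--     current_index = int(turn[3][1])
--
--     letters = [chr(x) for x in range(current_letter-1, current_letter+2 ) if min_l <= x <= max_l ]
--     indexes = [str(x) for x in range(current_index-1, current_index+2) if 1 <= x <= 8 ]
--
--     black_king_range = [l+i for l in letters for i in indexes ]
--
--     if turn[2] in black_king_range:
--         return False
--
--
--     if turn[1] == turn[2]: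
--         return False
--     return True
-- ===== SOURCE B (Python) =====
-- def tower_correct(turn):
--     king_letter = ord(turn[3][0])
--     king_index = int(turn[3][1])
--     target = turn[2]
--     if (len(target) == 2
--             and 'a' <= target[0] <= 'h'
--             and abs(ord(target[0]) - king_letter) <= 1
--             and '1' <= target[1] <= '8'
--             and abs(ord(target[1]) - ord('0') - king_index) <= 1):
--         return False
--     return turn[1] != turn[2]
-- ===== Notes on version B (the rewrite author's own statement) =====
-- stated objective: simpler
-- what changed: Instead of building the clamped letters/indexes neighbor lists, taking their cross product and testing membership, B parses the king's and target's coordinates and returns False exactly when the target is an on-board square within Chebyshev distance 1 of the king, otherwise returns turn[1] != turn[2].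
import Mathlib
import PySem

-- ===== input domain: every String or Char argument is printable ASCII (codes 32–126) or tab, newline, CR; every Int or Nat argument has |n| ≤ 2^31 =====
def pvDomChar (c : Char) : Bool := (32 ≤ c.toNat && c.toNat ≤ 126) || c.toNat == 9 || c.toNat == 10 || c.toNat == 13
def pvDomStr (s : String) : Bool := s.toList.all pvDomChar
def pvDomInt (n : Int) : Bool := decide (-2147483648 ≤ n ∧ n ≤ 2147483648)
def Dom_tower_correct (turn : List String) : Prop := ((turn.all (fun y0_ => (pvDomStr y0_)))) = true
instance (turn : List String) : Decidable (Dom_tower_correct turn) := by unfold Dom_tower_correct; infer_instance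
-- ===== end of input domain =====

-- B replaces A's neighbor-list construction + membership test by a direct
-- Chebyshev-distance check on the parsed coordinates (objective: simpler).

-- ===== PORT A =====
-- helper: the `letters` comprehension of A
def lettersA (current_letter : Int) : List String :=
  ((PySem.List.pyRange (current_letter - 1) (current_letter + 2) 1).filter
    (fun x => decide (97 ≤ x ∧ x ≤ 104))).map (fun x => String.ofList [Char.ofNat x.toNat])

-- helper: the `indexes` comprehension of A
def indexesA (current_index : Int) : List String :=
  ((PySem.List.pyRange (current_index - 1) (current_index + 2) 1).filter
    (fun x => decide (1 ≤ x ∧ x ≤ 8))).map (fun x => PySem.Int.toStr x)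

def tower_correct (turn : List String) : Bool :=
  let t3 := PySem.List.pyGetD turn 3 ""
  let current_letter : Int := (((PySem.Str.pyGet? t3 0).getD ' ').toNat : Int)
  let current_index : Int := (PySem.Int.ofChars? [(PySem.Str.pyGet? t3 1).getD ' ']).getD 0
  let letters := lettersA current_letter
  let indexes := indexesA current_index
  let black_king_range : List String := letters.flatMap (fun l => indexes.map (fun i => l ++ i))
  if black_king_range.contains (PySem.List.pyGetD turn 2 "") then false
  else if PySem.List.pyGetD turn 1 "" == PySem.List.pyGetD turn 2 "" then false
  else true

-- ===== PORT B =====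
def tower_correct_alt (turn : List String) : Bool :=
  let t3 := PySem.List.pyGetD turn 3 ""
  let king_letter : Int := (((PySem.Str.pyGet? t3 0).getD ' ').toNat : Int)
  let king_index : Int := (PySem.Int.ofChars? [(PySem.Str.pyGet? t3 1).getD ' ']).getD 0
  let target := (PySem.List.pyGetD turn 2 "").toList
  if target.length == 2 then
    let c0 := target.getD 0 ' '
    let c1 := target.getD 1 ' '
    if ('a' ≤ c0 ∧ c0 ≤ 'h') ∧ ((c0.toNat : Int) - king_letter).natAbs ≤ 1 ∧
       ('1' ≤ c1 ∧ c1 ≤ '8') ∧ ((c1.toNat : Int) - 48 - king_index).natAbs ≤ 1 then false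
    else PySem.List.pyGetD turn 1 "" != PySem.List.pyGetD turn 2 ""
  else PySem.List.pyGetD turn 1 "" != PySem.List.pyGetD turn 2 ""

-- ===== PRECONDITION & SPEC =====
-- Pre_ excludes inputs on which A raises: fewer than 4 moves (IndexError),
-- turn[3] shorter than 2 characters (IndexError), or turn[3][1] not a decimal
-- digit (int() raises ValueError).
def Pre_tower_correct (turn : List String) : Prop :=
  4 ≤ turn.length ∧ 2 ≤ (turn.getD 3 "").toList.length ∧
  (('0' : Char) ≤ (turn.getD 3 "").toList.getD 1 ' ' ∧ (turn.getD 3 "").toList.getD 1 ' ' ≤ ('9' : Char))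
instance (turn : List String) : Decidable (Pre_tower_correct turn) := by unfold Pre_tower_correct; infer_instance

def pvWitness_tower_correct : List String := ["w", "a1", "b2", "d4"]

def Spec_tower_correct (turn : List String) (out : Bool) : Prop := out = tower_correct_alt turn
instance (turn : List String) (out : Bool) : Decidable (Spec_tower_correct turn out) := by unfold Spec_tower_correct; infer_instance

-- ===== CLAIM (what is proved, stated in full; the proofs are below) =====
def Claim_equal_tower_correct : Prop := ∀ (turn : List String), Dom_tower_correct turn → Pre_tower_correct turn → Spec_tower_correct turn (tower_correct turn)

-- ===== LEMMAS AND PROOFS =====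

theorem char_le_iff (a b : Char) : a ≤ b ↔ a.toNat ≤ b.toNat := by
  constructor
  · exact Fin.mk_le_mk.mp
  · exact Fin.mk_le_mk.mpr

theorem ofNat_toNat_le (n : Nat) (h : n ≤ 104) : (Char.ofNat n).toNat = n := by
  unfold Char.ofNat; split <;> simp_all
  omega

theorem range3 (a : Int) : PySem.List.pyRange (a - 1) (a + 2) 1 = [a - 1, a - 1 + 1, a - 1 + 1 + 1] := by
  rw [PySem.List.pyRange_one_cons (by omega), PySem.List.pyRange_one_cons (by omega),
      PySem.List.pyRange_one_cons (by omega), PySem.List.pyRange_one_eq_nil (by omega)]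

theorem mem_lettersA (cl : Int) (s : String) :
    s ∈ lettersA cl ↔ ∃ c : Char, s.toList = [c] ∧ 97 ≤ c.toNat ∧ c.toNat ≤ 104 ∧
      ((c.toNat : Int) - cl).natAbs ≤ 1 := by
  unfold lettersA
  rw [range3]
  simp only [List.mem_map, List.mem_filter, List.mem_cons, List.not_mem_nil, or_false,
    decide_eq_true_eq]
  constructor
  · rintro ⟨x, ⟨hx, h1, h2⟩, rfl⟩
    refine ⟨Char.ofNat x.toNat, by simp, ?_, ?_, ?_⟩ <;>
      rw [ofNat_toNat_le x.toNat (by omega)] <;> omega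
  · rintro ⟨c, hs, h1, h2, h3⟩
    refine ⟨(c.toNat : Int), ⟨by omega, by omega, by omega⟩, ?_⟩
    rw [← String.ofList_toList (s := s), hs]
    simp [Char.ofNat_toNat]
theorem toStr_digit (x : Int) (h1 : 1 ≤ x) (h2 : x ≤ 8) :
    PySem.Int.toStr x = String.ofList [Char.ofNat (x.toNat + 48)] := by
  interval_cases x <;> decide

theorem mem_indexesA (ci : Int) (s : String) :
    s ∈ indexesA ci ↔ ∃ c : Char, s.toList = [c] ∧ 49 ≤ c.toNat ∧ c.toNat ≤ 56 ∧
      ((c.toNat : Int) - 48 - ci).natAbs ≤ 1 := by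
  unfold indexesA
  rw [range3]
  simp only [List.mem_map, List.mem_filter, List.mem_cons, List.not_mem_nil, or_false,
    decide_eq_true_eq]
  constructor
  · rintro ⟨x, ⟨hx, h1, h2⟩, rfl⟩
    rw [toStr_digit x h1 h2]
    refine ⟨Char.ofNat (x.toNat + 48), by simp, ?_, ?_, ?_⟩ <;>
      rw [ofNat_toNat_le (x.toNat + 48) (by omega)] <;> omega
  · rintro ⟨c, hs, h1, h2, h3⟩
    refine ⟨(c.toNat : Int) - 48, ⟨by omega, by omega, by omega⟩, ?_⟩
    rw [toStr_digit _ (by omega) (by omega), ← String.ofList_toList (s := s), hs]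
    congr 1
    have : ((c.toNat : Int) - 48).toNat + 48 = c.toNat := by omega
    rw [this, Char.ofNat_toNat]

theorem mem_bkr (cl ci : Int) (s : String) :
    ((lettersA cl).flatMap (fun l => (indexesA ci).map (fun i => l ++ i))).contains s = true ↔
      ∃ c0 c1 : Char, s.toList = [c0, c1] ∧
        97 ≤ c0.toNat ∧ c0.toNat ≤ 104 ∧ ((c0.toNat : Int) - cl).natAbs ≤ 1 ∧
        49 ≤ c1.toNat ∧ c1.toNat ≤ 56 ∧ ((c1.toNat : Int) - 48 - ci).natAbs ≤ 1 := by
  rw [List.contains_iff_mem]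
  simp only [List.mem_flatMap, List.mem_map]
  constructor
  · rintro ⟨l, hl, i, hi, rfl⟩
    obtain ⟨c0, hl0, a1, a2, a3⟩ := (mem_lettersA cl l).mp hl
    obtain ⟨c1, hi0, b1, b2, b3⟩ := (mem_indexesA ci i).mp hi
    exact ⟨c0, c1, by simp [hl0, hi0], a1, a2, a3, b1, b2, b3⟩
  · rintro ⟨c0, c1, hs, a1, a2, a3, b1, b2, b3⟩
    refine ⟨String.ofList [c0], (mem_lettersA cl _).mpr ⟨c0, by simp, a1, a2, a3⟩,
            String.ofList [c1], (mem_indexesA ci _).mpr ⟨c1, by simp, b1, b2, b3⟩, ?_⟩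
    rw [← String.ofList_toList (s := s), hs]
    apply String.toList_injective
    simp

-- ===== VERDICT (by name: the statement is the Claim_ definition above) =====
theorem tower_correct_spec : Claim_equal_tower_correct := by
  intro turn _ _
  unfold Spec_tower_correct tower_correct tower_correct_alt
  set cl : Int := (((PySem.Str.pyGet? (PySem.List.pyGetD turn 3 "") 0).getD ' ').toNat : Int) with hcl
  set ci : Int := (PySem.Int.ofChars? [(PySem.Str.pyGet? (PySem.List.pyGetD turn 3 "") 1).getD ' ']).getD 0 with hci
  set t2 := PySem.List.pyGetD turn 2 "" with ht2
  set t1 := PySem.List.pyGetD turn 1 "" with ht1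
  simp only []
  have hne : (if t1 == t2 then false else true) = (t1 != t2) := by
    by_cases heq : t1 = t2
    · simp [heq]
    · simp [bne_iff_ne, heq]
  by_cases hmem : ((lettersA cl).flatMap (fun l => (indexesA ci).map (fun i => l ++ i))).contains t2 = true
  · obtain ⟨c0, c1, hs, a1, a2, a3, b1, b2, b3⟩ := (mem_bkr cl ci t2).mp hmem
    rw [if_pos hmem, hs]
    rw [if_pos (by simp), if_pos]
    refine ⟨⟨?_, ?_⟩, by simpa using a3, ⟨?_, ?_⟩, by simpa using b3⟩ <;>
      (rw [char_le_iff]; simp; omega)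
  · rw [if_neg hmem, hne]
    by_cases hlen : t2.toList.length = 2
    · match h : t2.toList, hlen with
      | [c0, c1], _ =>
        rw [if_pos (by simp), if_neg]
        intro ⟨⟨q1, q2⟩, q3, ⟨q4, q5⟩, q6⟩
        simp only [List.getD_cons_zero, List.getD_cons_succ] at q1 q2 q3 q4 q5 q6
        exact hmem ((mem_bkr cl ci t2).mpr ⟨c0, c1, h,
          by rw [char_le_iff] at q1; simpa using q1,
          by rw [char_le_iff] at q2; simpa using q2, by simpa using q3,
          by rw [char_le_iff] at q4; simpa using q4,
          by rw [char_le_iff] at q5; simpa using q5, by simpa using q6⟩)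
    · rw [if_neg (by simpa using hlen)]
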